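-- pv_equiv track=rewrite | github.com/tachycardiazxc/RetextAiApi | requests_logic/proxies_former.py | stripper
-- ===== SOURCE A (Python) =====
-- def stripper(text):
--     quotes_count = 0
--     final_text = ""
--     for elem in text:
--         if elem == '"':
--             quotes_count += 1
--             continue
--         if quotes_count != 3:
--             pass
--         elif quotes_count == 3:
--             final_text += elem
--         elif quotes_count > 3:
--             break
--     return final_text
-- ===== SOURCE B (Python) =====
-- def stripper(text):
--     parts = text.split('"')
--     return parts[3] if len(parts) > 3 else ""
-- ===== Notes on version B (the rewrite author's own statement) =====
-- stated objective: simpler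
-- what changed: Replaced the character-by-character loop with a quote counter by a single str.split on the quote character, returning the 4th piece (the text after exactly three quotes) when it exists and the empty string otherwise.
import Mathlib
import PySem

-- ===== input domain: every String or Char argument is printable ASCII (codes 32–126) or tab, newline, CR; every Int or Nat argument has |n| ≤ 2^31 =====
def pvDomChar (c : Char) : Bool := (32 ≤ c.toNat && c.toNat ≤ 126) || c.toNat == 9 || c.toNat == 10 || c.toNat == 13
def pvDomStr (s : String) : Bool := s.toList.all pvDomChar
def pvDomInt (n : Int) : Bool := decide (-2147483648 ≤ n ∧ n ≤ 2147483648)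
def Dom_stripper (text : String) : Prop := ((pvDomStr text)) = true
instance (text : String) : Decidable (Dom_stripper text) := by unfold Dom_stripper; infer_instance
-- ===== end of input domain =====

-- B replaces A's character loop with quote-counter by one split('"') and taking the 4th piece (simpler).

-- ===== PORT A =====
-- the for-loop over the string: state = (quotes_count, final_text); the final 'elif quotes_count > 3: break' of A
-- is kept as the trailing else-branch (it is unreachable, as in A)
def stripLoop : List Char → Int → String → String
  | [], _, ft => ft
  | c :: rest, qc, ft =>
    if c = '"' then stripLoop rest (qc + 1) ft
    else if qc ≠ 3 then stripLoop rest qc ft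
    else if qc = 3 then stripLoop rest qc (ft.push c)
    else ft

def stripper (text : String) : String := stripLoop text.toList 0 ""

-- ===== PORT B =====
def stripper_alt (text : String) : String :=
  let parts := PySem.Chars.splitOn text.toList ['"']
  if 3 < parts.length then String.ofList (parts.getD 3 []) else ""

-- ===== PRECONDITION & SPEC =====
def Spec_stripper (text : String) (out : String) : Prop := out = stripper_alt text
instance (text : String) (out : String) : Decidable (Spec_stripper text out) := by unfold Spec_stripper; infer_instance

-- ===== CLAIM (what is proved, stated in full; the proofs are below) =====
def Claim_equal_stripper : Prop := ∀ (text : String), Dom_stripper text → Spec_stripper text (stripper text)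

-- ===== LEMMAS AND PROOFS =====

-- accumulator-free form of A's loop
def fA : List Char → Int → List Char
  | [], _ => []
  | c :: rest, qc =>
    if c = '"' then fA rest (qc + 1)
    else if qc = 3 then c :: fA rest qc
    else fA rest qc

-- reference split on '"'
def splitQ : List Char → List (List Char)
  | [] => [[]]
  | c :: rest =>
    if c = '"' then [] :: splitQ rest
    else (c :: (splitQ rest).headI) :: (splitQ rest).tail

theorem splitQ_ne_nil (l : List Char) : splitQ l ≠ [] := by
  cases l with
  | nil => simp [splitQ]
  | cons c rest => simp only [splitQ]; split <;> simp

theorem stripLoop_eq_fA (l : List Char) : ∀ (qc : Int) (ft : String),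
    stripLoop l qc ft = ft ++ String.ofList (fA l qc) := by
  induction l with
  | nil => intro qc ft; apply String.toList_inj.mp; simp [stripLoop, fA]
  | cons c rest ih =>
    intro qc ft
    by_cases hq : c = '"'
    · simp [stripLoop, fA, hq, ih]
    · by_cases h3 : qc = 3
      · simp only [stripLoop, fA, if_neg hq, h3]
        simp only [ne_eq, not_true_eq_false, if_false, ih]
        apply String.toList_inj.mp; simp
      · simp [stripLoop, fA, hq, h3, ih]

theorem fA_gt3 (l : List Char) : ∀ qc : Int, 3 < qc → fA l qc = [] := by
  induction l with
  | nil => intro qc _; simp [fA]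
  | cons c rest ih =>
    intro qc h
    by_cases hq : c = '"'
    · simp [fA, hq, ih (qc + 1) (by omega)]
    · simp only [fA, if_neg hq, ih qc h, if_neg (show ¬ qc = 3 by omega)]

theorem fA_eq_splitQ (l : List Char) : ∀ q : Nat, q ≤ 3 →
    fA l ((q : Int)) = (splitQ l).getD (3 - q) [] := by
  induction l with
  | nil =>
    intro q _
    simp only [fA, splitQ]
    cases h : 3 - q <;> simp [List.getD]
  | cons c rest ih =>
    intro q hq
    by_cases hc : c = '"'
    · by_cases h3 : q = 3
      · subst h3
        simp only [fA, if_pos hc, splitQ]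
        rw [show ((3:Nat) : Int) + 1 = 4 by norm_num, fA_gt3 rest 4 (by norm_num)]
        simp
      · have : ((q : Int)) + 1 = ((q + 1 : Nat) : Int) := by push_cast; ring
        simp only [fA, if_pos hc, splitQ, this, ih (q + 1) (by omega)]
        have h1 : 3 - q = (3 - (q + 1)) + 1 := by omega
        rw [h1]; simp
    · have hne : ((q : Int)) = 3 ↔ q = 3 := by omega
      by_cases h3 : q = 3
      · subst h3
        simp only [fA, if_neg hc, if_pos (by norm_num : ((3:Nat):Int) = 3)]
        rw [ih 3 le_rfl]
        obtain ⟨p, ps, hps⟩ := List.exists_cons_of_ne_nil (splitQ_ne_nil rest)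
        simp [splitQ, hc, hps]
      · have : ((q : Int)) ≠ 3 := by omega
        simp only [fA, if_neg hc, if_neg this, ih q hq]
        obtain ⟨p, ps, hps⟩ := List.exists_cons_of_ne_nil (splitQ_ne_nil rest)
        have h1 : 3 - q = (3 - q - 1) + 1 := by omega
        rw [h1]
        simp [splitQ, hc, hps]

theorem splitOn_go_eq (fuel : Nat) : ∀ (l cur : List Char) (r : List (List Char)),
    l.length ≤ fuel →
    PySem.Chars.splitOn.go ['"'] fuel l cur r =
      r.reverse ++ (cur.reverse ++ (splitQ l).headI) :: (splitQ l).tail := by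
  induction fuel with
  | zero =>
    intro l cur r h
    have hl : l = [] := by cases l <;> simp_all
    subst hl
    rw [PySem.Chars.splitOn.go.eq_def]
    simp [splitQ]
  | succ fuel ih =>
    intro l cur r h
    cases l with
    | nil =>
      rw [PySem.Chars.splitOn.go.eq_def]
      simp [splitQ]
    | cons c rest =>
      rw [PySem.Chars.splitOn.go.eq_def]
      simp only [List.length_cons] at h
      by_cases hc : c = '"'
      · have hpre : List.isPrefixOf ['"'] (c :: rest) = true := by
          simp [List.isPrefixOf, hc]
        simp only [hpre, if_true, List.length_cons, List.length_nil, List.drop_succ_cons,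
          List.drop_zero]
        rw [ih rest [] (cur.reverse :: r) (by simpa using Nat.le_of_succ_le_succ h)]
        obtain ⟨p, ps, hps⟩ := List.exists_cons_of_ne_nil (splitQ_ne_nil rest)
        simp [splitQ, hc, hps]
      · have hpre : List.isPrefixOf ['"'] (c :: rest) = false := by
          simp [List.isPrefixOf]; exact fun hh => absurd hh.symm hc
        simp only [hpre, Bool.false_eq_true, if_false]
        rw [ih rest (c :: cur) r (by omega)]
        simp [splitQ, hc]

theorem splitOn_eq_splitQ (l : List Char) : PySem.Chars.splitOn l ['"'] = splitQ l := by
  have := splitOn_go_eq (l.length + 1) l [] [] (by omega)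
  unfold PySem.Chars.splitOn
  rw [this]
  obtain ⟨p, ps, hps⟩ := List.exists_cons_of_ne_nil (splitQ_ne_nil l)
  simp [hps]

-- ===== VERDICT (by name: the statement is the Claim_ definition above) =====
theorem stripper_spec : Claim_equal_stripper := by
  intro text _
  unfold Spec_stripper stripper stripper_alt
  rw [splitOn_eq_splitQ]
  rw [stripLoop_eq_fA]
  have h0 := fA_eq_splitQ text.toList 0 (by norm_num)
  simp only [Nat.cast_zero] at h0
  rw [h0]
  simp only [Nat.sub_zero]
  by_cases h : 3 < (splitQ text.toList).length
  · simp [h]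
  · have : (splitQ text.toList).getD 3 [] = [] := by
      rw [List.getD_eq_getElem?_getD, List.getElem?_eq_none (by omega)]; rfl
    rw [this]
    simp [h]
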